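-- pv_equiv track=rewrite | github.com/huggin/geek | stack_queue/remove_balls.py | finLength
-- ===== SOURCE A (Python) =====
-- from typing import List
--
-- def finLength(N: int, color: List[int], radius: List[int]) -> int:
--     # code here
--     s = []
--     for i in range(N):
--         if len(s) > 0 and s[-1][0] == color[i] and s[-1][1] == radius[i]:
--             s.pop()
--         else:
--             s.append((color[i], radius[i]))
--
--     return len(s)
-- ===== SOURCE B (Python) =====
-- def _pass(seq):
--     # one left-to-right scan: drop each adjacent equal pair met
--     out = []
--     i = 0
--     while i < len(seq):
--         if i + 1 < len(seq) and seq[i] == seq[i + 1]: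
--             i += 2
--         else:
--             out.append(seq[i])
--             i += 1
--     return out
--
--
-- def finLength(N, color, radius):
--     seq = [(color[i], radius[i]) for i in range(N)]
--     while True:
--         out = _pass(seq)
--         if out == seq:
--             return len(seq)
--         seq = out
-- ===== Notes on version B (the rewrite author's own statement) =====
-- stated objective: alternative
-- what changed: Replaces the one-pass stack simulation by iterated left-to-right cancellation of adjacent equal (color,radius) pairs until a scan removes nothing, returning the length of the stabilized sequence (equal by confluence of adjacent-pair cancellation).
import Mathlib
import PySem

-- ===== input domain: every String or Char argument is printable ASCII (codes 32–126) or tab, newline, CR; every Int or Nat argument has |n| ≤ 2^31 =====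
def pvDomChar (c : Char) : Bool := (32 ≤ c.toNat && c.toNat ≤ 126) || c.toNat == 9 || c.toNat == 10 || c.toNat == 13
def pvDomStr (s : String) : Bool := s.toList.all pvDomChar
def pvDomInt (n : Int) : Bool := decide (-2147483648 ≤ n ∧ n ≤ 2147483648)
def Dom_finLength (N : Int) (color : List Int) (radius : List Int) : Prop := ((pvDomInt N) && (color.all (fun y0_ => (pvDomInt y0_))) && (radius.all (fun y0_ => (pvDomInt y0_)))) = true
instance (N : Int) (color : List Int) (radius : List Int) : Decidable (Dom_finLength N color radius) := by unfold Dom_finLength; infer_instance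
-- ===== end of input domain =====

-- B iterates whole-list cancellation of adjacent equal pairs to a fixed point instead of A's
-- single stack pass; equivalence of return values is proved (objective: alternative algorithm).

-- ===== PORT A =====
-- Stack represented with the top at the HEAD (push = cons, s[-1] = head, pop = tail);
-- s[-1][0]==color[i] and s[-1][1]==radius[i] is the componentwise test on the head pair.
def finLength (N : Int) (color : List Int) (radius : List Int) : Int :=
  ((PySem.List.pyRange 0 N 1).foldl (fun s i =>
      match s with
      | t :: rest =>
          if t.1 = (PySem.List.pyGet? color i).getD 0 ∧ t.2 = (PySem.List.pyGet? radius i).getD 0 then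
            rest
          else
            ((PySem.List.pyGet? color i).getD 0, (PySem.List.pyGet? radius i).getD 0) :: t :: rest
      | [] => [((PySem.List.pyGet? color i).getD 0, (PySem.List.pyGet? radius i).getD 0)])
    []).length

-- ===== PORT B =====
-- one left-to-right scan dropping each adjacent equal pair met (_pass in Source B)
def pvPass : List (Int × Int) → List (Int × Int)
  | [] => []
  | [a] => [a]
  | a :: b :: rest => if a = b then pvPass rest else a :: pvPass (b :: rest)
termination_by l => l.length

-- the 'while True' loop of Source B, made total with fuel (each changing pass shrinks the list)
def pvFix (fuel : Nat) (seq : List (Int × Int)) : List (Int × Int) :=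
  match fuel with
  | 0 => seq
  | fuel + 1 =>
      let out := pvPass seq
      if out = seq then seq else pvFix fuel out

def finLength_alt (N : Int) (color : List Int) (radius : List Int) : Int :=
  let seq := (PySem.List.pyRange 0 N 1).map (fun i =>
      ((PySem.List.pyGet? color i).getD 0, (PySem.List.pyGet? radius i).getD 0))
  (pvFix seq.length seq).length

-- ===== PRECONDITION & SPEC =====
-- Pre_ excludes exactly the inputs where Python A raises IndexError: N exceeding a list length.
def Pre_finLength (N : Int) (color : List Int) (radius : List Int) : Prop :=
  N ≤ (color.length : Int) ∧ N ≤ (radius.length : Int)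
instance (N : Int) (color : List Int) (radius : List Int) : Decidable (Pre_finLength N color radius) := by unfold Pre_finLength; infer_instance
def pvWitness_finLength : Int × List Int × List Int := (3, [1, 2, 1], [3, 3, 3])

def Spec_finLength (N : Int) (color : List Int) (radius : List Int) (out : Int) : Prop := out = finLength_alt N color radius
instance (N : Int) (color : List Int) (radius : List Int) (out : Int) : Decidable (Spec_finLength N color radius out) := by unfold Spec_finLength; infer_instance

-- ===== CLAIM (what is proved, stated in full; the proofs are below) =====
def Claim_equal_finLength : Prop := ∀ (N : Int) (color : List Int) (radius : List Int), Dom_finLength N color radius → Pre_finLength N color radius → Spec_finLength N color radius (finLength N color radius)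

-- ===== LEMMAS AND PROOFS =====

-- A's stack step on a (color,radius) pair
def pvStep (s : List (Int × Int)) (p : Int × Int) : List (Int × Int) :=
  match s with
  | t :: rest => if t = p then rest else p :: t :: rest
  | [] => [p]

-- stack states never contain adjacent equal elements
lemma pvStep_chain {s : List (Int × Int)} (h : s.IsChain (· ≠ ·)) (p : Int × Int) :
    (pvStep s p).IsChain (· ≠ ·) := by
  cases s with
  | nil => simp [pvStep]
  | cons t rest =>
      by_cases hp : t = p
      · simpa [pvStep, hp] using (List.isChain_cons.mp h).2
      · simpa [pvStep, hp] using List.isChain_cons_cons.mpr ⟨Ne.symm hp, h⟩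

-- cancelling two equal adjacent elements leaves an irreducible stack unchanged
lemma pvStep_cancel {s : List (Int × Int)} (h : s.IsChain (· ≠ ·)) (p : Int × Int) :
    pvStep (pvStep s p) p = s := by
  cases s with
  | nil => simp [pvStep]
  | cons t rest =>
      by_cases hp : t = p
      · subst hp
        cases rest with
        | nil => simp [pvStep]
        | cons u rest' =>
            have hu : t ≠ u := (List.isChain_cons_cons.mp h).1
            simp [pvStep, Ne.symm hu]
      · simp [pvStep, hp]

-- one scan pass does not change the resulting stack
lemma pvPass_foldl (l : List (Int × Int)) :
    ∀ s : List (Int × Int), s.IsChain (· ≠ ·) →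
      (pvPass l).foldl pvStep s = l.foldl pvStep s := by
  induction l using pvPass.induct with
  | case1 => intro s _; simp [pvPass]
  | case2 a => intro s _; simp [pvPass]
  | case3 b rest ih =>
      intro s hs
      have hp : pvPass (b :: b :: rest) = pvPass rest := by simp [pvPass]
      rw [hp, ih s hs, List.foldl_cons, List.foldl_cons, pvStep_cancel hs]
  | case4 a b rest hab ih =>
      intro s hs
      have hp : pvPass (a :: b :: rest) = a :: pvPass (b :: rest) := by simp [pvPass, hab]
      rw [hp, List.foldl_cons, List.foldl_cons]
      exact ih (pvStep s a) (pvStep_chain hs a)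

lemma pvPass_length_le (l : List (Int × Int)) : (pvPass l).length ≤ l.length := by
  induction l using pvPass.induct with
  | case1 => simp [pvPass]
  | case2 a => simp [pvPass]
  | case3 b rest ih =>
      have hp : pvPass (b :: b :: rest) = pvPass rest := by simp [pvPass]
      rw [hp]; simp only [List.length_cons]; omega
  | case4 a b rest hab ih =>
      have hp : pvPass (a :: b :: rest) = a :: pvPass (b :: rest) := by simp [pvPass, hab]
      simp only [List.length_cons] at ih
      rw [hp]; simp only [List.length_cons]; omega

lemma pvPass_length_lt {l : List (Int × Int)} (h : pvPass l ≠ l) :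
    (pvPass l).length < l.length := by
  induction l using pvPass.induct with
  | case1 => simp [pvPass] at h
  | case2 a => simp [pvPass] at h
  | case3 b rest ih =>
      have hle := pvPass_length_le rest
      have hp : pvPass (b :: b :: rest) = pvPass rest := by simp [pvPass]
      rw [hp]; simp only [List.length_cons]; omega
  | case4 a b rest hab ih =>
      have hp : pvPass (a :: b :: rest) = a :: pvPass (b :: rest) := by simp [pvPass, hab]
      rw [hp] at h ⊢
      have hne : pvPass (b :: rest) ≠ b :: rest := fun he => h (by rw [he])
      have := ih hne
      simp only [List.length_cons] at this ⊢; omega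

-- a fixed point of the pass has no adjacent equal elements
lemma pvPass_fixed_chain {l : List (Int × Int)} (h : pvPass l = l) :
    l.IsChain (· ≠ ·) := by
  induction l using pvPass.induct with
  | case1 => simp
  | case2 a => simp
  | case3 b rest ih =>
      exfalso
      have hle := pvPass_length_le rest
      have hp : pvPass (b :: b :: rest) = pvPass rest := by simp [pvPass]
      rw [hp] at h
      have : (pvPass rest).length = (b :: b :: rest).length := by rw [h]
      simp only [List.length_cons] at this
      omega
  | case4 a b rest hab ih =>
      have hp : pvPass (a :: b :: rest) = a :: pvPass (b :: rest) := by simp [pvPass, hab]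
      rw [hp] at h
      have h' : pvPass (b :: rest) = b :: rest := by injection h
      exact List.isChain_cons_cons.mpr ⟨hab, ih h'⟩

-- pushing an irreducible list onto a compatible stack reverses it on top
lemma pvFoldl_irreducible (l : List (Int × Int)) :
    ∀ s : List (Int × Int), l.IsChain (· ≠ ·) →
      (∀ x ∈ s.head?, ∀ y ∈ l.head?, x ≠ y) →
      l.foldl pvStep s = l.reverse ++ s := by
  induction l with
  | nil => intro s _ _; simp
  | cons p rest ih =>
      intro s hchain hcomp
      have hstep : pvStep s p = p :: s := by
        cases s with
        | nil => simp [pvStep]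
        | cons b s' =>
            have hb : b ≠ p := hcomp b (by simp) p (by simp)
            simp [pvStep, hb]
      rw [List.foldl_cons, hstep,
        ih (p :: s) (List.isChain_cons.mp hchain).2
          (by
            intro x hx y hy
            simp only [List.head?_cons, Option.mem_def, Option.some.injEq] at hx
            subst hx
            exact (List.isChain_cons.mp hchain).1 y hy)]
      simp

lemma pvFix_foldl (fuel : Nat) (l : List (Int × Int)) :
    (pvFix fuel l).foldl pvStep [] = l.foldl pvStep [] := by
  induction fuel generalizing l with
  | zero => rfl
  | succ fuel ih =>
      simp only [pvFix]
      by_cases h : pvPass l = l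
      · simp [h]
      · simp only [h, if_false]
        rw [ih (pvPass l), pvPass_foldl l [] (by simp)]

lemma pvFix_fixed (fuel : Nat) (l : List (Int × Int)) (h : l.length ≤ fuel) :
    pvPass (pvFix fuel l) = pvFix fuel l := by
  induction fuel generalizing l with
  | zero =>
      have : l = [] := List.length_eq_zero_iff.mp (Nat.le_zero.mp h)
      subst this
      simp [pvFix, pvPass]
  | succ fuel ih =>
      simp only [pvFix]
      by_cases hfix : pvPass l = l
      · simp [hfix]
      · simp only [hfix, if_false]
        exact ih (pvPass l) (by have := pvPass_length_lt hfix; omega)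

-- main lemma: the fixed-point iteration and the stack pass agree in length
lemma pvFix_length (l : List (Int × Int)) :
    ((pvFix l.length l).length : Int) = ((l.foldl pvStep []).length : Int) := by
  set r := pvFix l.length l with hr
  have hfix : pvPass r = r := pvFix_fixed l.length l le_rfl
  have hchain : r.IsChain (· ≠ ·) := pvPass_fixed_chain hfix
  have hirr : r.foldl pvStep [] = r.reverse ++ [] :=
    pvFoldl_irreducible r [] hchain (by intro x hx; simp at hx)
  have hsame : r.foldl pvStep [] = l.foldl pvStep [] := pvFix_foldl l.length l
  rw [← hsame, hirr]
  simp

-- A's fold body is pvStep applied to the mapped pair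
lemma pvFoldA_eq (color radius : List Int) (l : List Int) :
    l.foldl (fun s i =>
      match s with
      | t :: rest =>
          if t.1 = (PySem.List.pyGet? color i).getD 0 ∧ t.2 = (PySem.List.pyGet? radius i).getD 0 then
            rest
          else
            ((PySem.List.pyGet? color i).getD 0, (PySem.List.pyGet? radius i).getD 0) :: t :: rest
      | [] => [((PySem.List.pyGet? color i).getD 0, (PySem.List.pyGet? radius i).getD 0)]) []
    = (l.map (fun i =>
        ((PySem.List.pyGet? color i).getD 0, (PySem.List.pyGet? radius i).getD 0))).foldl pvStep [] := by
  rw [List.foldl_map]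
  congr 1
  funext s i
  cases s with
  | nil => rfl
  | cons t rest => simp [pvStep, Prod.ext_iff]

-- ===== VERDICT (by name: the statement is the Claim_ definition above) =====
theorem finLength_spec : Claim_equal_finLength := by
  intro N color radius _ _
  unfold Spec_finLength finLength finLength_alt
  rw [pvFoldA_eq, ← pvFix_length]
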